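-- pv_equiv track=rewrite | github.com/minnsou/FrontierArtificialIntelligence | mahjong_utils.py | is_ipeko
-- ===== SOURCE A (Python) =====
-- def is_ipeko(split_state):
--     for block in split_state:
--         if len(block) == 2:
--             continue
--         if block[0] != block[1]:
--             temp = list(split_state)
--             temp.remove(block)
--             if block in temp:
--                 return True
--     return False
-- ===== SOURCE B (Python) =====
-- def is_ipeko(split_state):
--     counts = {}
--     for b in split_state:
--         t = tuple(b)
--         counts[t] = counts.get(t, 0) + 1
--     for t, c in counts.items():
--         if c >= 2 and len(t) != 2 and t[0] != t[1]:
--             return True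
--     return False
-- ===== Notes on version B (the rewrite author's own statement) =====
-- stated objective: alternative
-- what changed: Replaces A's per-block list copy, remove and membership rescan with a frequency table built in one pass followed by one pass over the distinct blocks checking count >= 2.
-- outside the precondition, e.g. on is_ipeko([(1, 2, 3), (1, 2, 3), (5,)]): A returns True, B returns True
import Mathlib
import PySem

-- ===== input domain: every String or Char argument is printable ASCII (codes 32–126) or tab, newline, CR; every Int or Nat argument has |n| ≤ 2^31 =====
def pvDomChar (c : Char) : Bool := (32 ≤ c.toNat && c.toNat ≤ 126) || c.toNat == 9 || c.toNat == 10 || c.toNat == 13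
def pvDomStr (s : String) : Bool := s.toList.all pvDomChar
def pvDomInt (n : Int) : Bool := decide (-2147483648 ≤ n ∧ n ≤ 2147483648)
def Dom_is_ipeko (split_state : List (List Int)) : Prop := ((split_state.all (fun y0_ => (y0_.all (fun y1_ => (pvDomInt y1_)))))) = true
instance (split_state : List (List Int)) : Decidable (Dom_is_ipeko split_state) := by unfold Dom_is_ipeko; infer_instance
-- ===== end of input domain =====

-- B replaces A's per-block copy+remove+membership rescan with a frequency table built once,
-- then one pass over the distinct blocks checking their count (alternative decomposition).
-- ===== PORT A =====
-- the for-loop of A: 'ss' is the whole split_state (needed for temp = list(split_state)),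
-- the second argument is the remaining blocks to visit
def isIpekoLoopA (ss : List (List Int)) : List (List Int) → Bool
  | [] => false
  | block :: rest =>
    if block.length = 2 then isIpekoLoopA ss rest           -- continue
    else
      match PySem.List.pyGet? block 0, PySem.List.pyGet? block 1 with
      | some a, some b =>
        if a ≠ b then
          match PySem.List.remove? ss block with             -- temp = list(ss); temp.remove(block)
          | some temp => if block ∈ temp then true else isIpekoLoopA ss rest
          | none => isIpekoLoopA ss rest                     -- unreachable: block ∈ ss
        else isIpekoLoopA ss rest
      | _, _ => false                                        -- Python raises IndexError here (outside Pre_)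

def is_ipeko (split_state : List (List Int)) : Bool :=
  isIpekoLoopA split_state split_state

-- ===== PORT B =====
-- second loop of B: scan the (block, count) items of the frequency table
def isIpekoScanB : List (List Int × Int) → Bool
  | [] => false
  | (t, c) :: rest =>
    if 2 ≤ c ∧ t.length ≠ 2 then                            -- short-circuit: t[0] only read past these
      match PySem.List.pyGet? t 0, PySem.List.pyGet? t 1 with
      | some a, some b => if a ≠ b then true else isIpekoScanB rest
      | _, _ => false                                        -- Python raises IndexError here (outside Pre_)
    else isIpekoScanB rest

def is_ipeko_alt (split_state : List (List Int)) : Bool :=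
  isIpekoScanB (split_state.foldl (fun d b => d.insert b (d.getD b 0 + 1)) PySem.Dict.empty).items

-- ===== PRECONDITION & SPEC =====
-- Pre_ excludes states containing a block of fewer than 2 tiles: A's 'block[0] != block[1]'
-- raises IndexError on such a block (unless an earlier duplicate run returns True first,
-- in which case both programs return True anyway).
def Pre_is_ipeko (split_state : List (List Int)) : Prop :=
  ∀ b ∈ split_state, 2 ≤ b.length
instance (split_state : List (List Int)) : Decidable (Pre_is_ipeko split_state) := by
  unfold Pre_is_ipeko; infer_instance

def pvWitness_is_ipeko : List (List Int) := [[1, 2, 3], [1, 2, 3], [5, 5]]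

def Spec_is_ipeko (split_state : List (List Int)) (out : Bool) : Prop := out = is_ipeko_alt split_state
instance (split_state : List (List Int)) (out : Bool) : Decidable (Spec_is_ipeko split_state out) := by unfold Spec_is_ipeko; infer_instance

-- ===== CLAIM (what is proved, stated in full; the proofs are below) =====
def Claim_equal_is_ipeko : Prop := ∀ (split_state : List (List Int)), Dom_is_ipeko split_state → Pre_is_ipeko split_state → Spec_is_ipeko split_state (is_ipeko split_state)

-- ===== LEMMAS AND PROOFS =====

theorem isIpekoLoopA_eq (ss : List (List Int)) (l : List (List Int))
    (hsub : ∀ b ∈ l, b ∈ ss) (hpre : Pre_is_ipeko ss) :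
    isIpekoLoopA ss l =
      decide (∃ b ∈ l, b.length ≠ 2 ∧
        PySem.List.pyGet? b 0 ≠ PySem.List.pyGet? b 1 ∧ 2 ≤ ss.count b) := by
  induction l with
  | nil => simp [isIpekoLoopA]
  | cons block rest ih =>
    have hmem : block ∈ ss := hsub block (by simp)
    have hlen : 2 ≤ block.length := hpre block hmem
    have h0 : PySem.List.pyGet? block 0 = some block[0] :=
      PySem.List.pyGet?_ofNat block 0 (by omega)
    have h1 : PySem.List.pyGet? block 1 = some block[1] :=
      PySem.List.pyGet?_ofNat block 1 (by omega)
    have hrest := ih (fun b hb => hsub b (by simp [hb]))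
    have hrem : PySem.List.remove? ss block = some (ss.erase block) :=
      PySem.List.remove?_eq_some_erase ss block hmem
    have hcnt : block ∈ ss.erase block ↔ 2 ≤ ss.count block := by
      rw [← List.count_pos_iff, List.count_erase_self]
      have : 1 ≤ ss.count block := List.count_pos_iff.mpr hmem
      omega
    by_cases h2 : block.length = 2
    · rw [show isIpekoLoopA ss (block :: rest) = isIpekoLoopA ss rest from by
        simp [isIpekoLoopA, h2], hrest, decide_eq_decide]
      constructor
      · rintro ⟨b, hb, hP⟩; exact ⟨b, List.mem_cons_of_mem _ hb, hP⟩
      · rintro ⟨b, hb, hP⟩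
        rcases List.mem_cons.mp hb with hb | hb
        · subst hb; exact absurd h2 hP.1
        · exact ⟨b, hb, hP⟩
    · by_cases hne : block[0] ≠ block[1]
      · by_cases hm : block ∈ ss.erase block
        · rw [show isIpekoLoopA ss (block :: rest) = true from by
            simp [isIpekoLoopA, h2, h0, h1, hne, hrem, hm]]
          symm; rw [decide_eq_true_iff]
          exact ⟨block, List.mem_cons_self, h2, by simp [h0, h1, hne], hcnt.mp hm⟩
        · rw [show isIpekoLoopA ss (block :: rest) = isIpekoLoopA ss rest from by
            simp [isIpekoLoopA, h2, h0, h1, hne, hrem, hm], hrest, decide_eq_decide]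
          constructor
          · rintro ⟨b, hb, hP⟩; exact ⟨b, List.mem_cons_of_mem _ hb, hP⟩
          · rintro ⟨b, hb, hP⟩
            rcases List.mem_cons.mp hb with hb | hb
            · subst hb; exact absurd (hcnt.mpr hP.2.2) hm
            · exact ⟨b, hb, hP⟩
      · simp only [ne_eq, not_not] at hne
        rw [show isIpekoLoopA ss (block :: rest) = isIpekoLoopA ss rest from by
          simp [isIpekoLoopA, h2, h0, h1, hne], hrest, decide_eq_decide]
        constructor
        · rintro ⟨b, hb, hP⟩; exact ⟨b, List.mem_cons_of_mem _ hb, hP⟩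
        · rintro ⟨b, hb, hP⟩
          rcases List.mem_cons.mp hb with hb | hb
          · subst hb; exact absurd (by simp [h0, h1, hne]) hP.2.1
          · exact ⟨b, hb, hP⟩

theorem isIpekoScanB_eq (l : List (List Int × Int))
    (hpre : ∀ p ∈ l, 2 ≤ p.1.length) :
    isIpekoScanB l =
      decide (∃ p ∈ l, 2 ≤ p.2 ∧ p.1.length ≠ 2 ∧
        PySem.List.pyGet? p.1 0 ≠ PySem.List.pyGet? p.1 1) := by
  induction l with
  | nil => simp [isIpekoScanB]
  | cons p rest ih =>
    obtain ⟨t, c⟩ := p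
    have hlen : 2 ≤ t.length := hpre (t, c) (by simp)
    have h0 : PySem.List.pyGet? t 0 = some t[0] :=
      PySem.List.pyGet?_ofNat t 0 (by omega)
    have h1 : PySem.List.pyGet? t 1 = some t[1] :=
      PySem.List.pyGet?_ofNat t 1 (by omega)
    have hrest := ih (fun q hq => hpre q (by simp [hq]))
    by_cases hc : 2 ≤ c ∧ t.length ≠ 2
    · by_cases hne : t[0] ≠ t[1]
      · rw [show isIpekoScanB ((t, c) :: rest) = true from by
          simp [isIpekoScanB, hc, h0, h1, hne]]
        symm; rw [decide_eq_true_iff]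
        exact ⟨(t, c), List.mem_cons_self, hc.1, hc.2, by simp [h0, h1, hne]⟩
      · simp only [ne_eq, not_not] at hne
        rw [show isIpekoScanB ((t, c) :: rest) = isIpekoScanB rest from by
          simp [isIpekoScanB, hc, h0, h1, hne], hrest, decide_eq_decide]
        constructor
        · rintro ⟨q, hq, hP⟩; exact ⟨q, List.mem_cons_of_mem _ hq, hP⟩
        · rintro ⟨q, hq, hP⟩
          rcases List.mem_cons.mp hq with hq | hq
          · subst hq; exact absurd (by simp [h0, h1, hne]) hP.2.2
          · exact ⟨q, hq, hP⟩
    · rw [show isIpekoScanB ((t, c) :: rest) = isIpekoScanB rest from by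
        simp [isIpekoScanB, hc], hrest, decide_eq_decide]
      constructor
      · rintro ⟨q, hq, hP⟩; exact ⟨q, List.mem_cons_of_mem _ hq, hP⟩
      · rintro ⟨q, hq, hP⟩
        rcases List.mem_cons.mp hq with hq | hq
        · subst hq; exact absurd ⟨hP.1, hP.2.1⟩ hc
        · exact ⟨q, hq, hP⟩

-- ===== VERDICT (by name: the statement is the Claim_ definition above) =====
theorem is_ipeko_spec : Claim_equal_is_ipeko := by
  intro ss _ hpre
  unfold Spec_is_ipeko is_ipeko is_ipeko_alt
  rw [PySem.Dict.foldl_insert_getD_add_one_eq_counter, PySem.Dict.items_counter]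
  rw [isIpekoLoopA_eq ss ss (fun _ h => h) hpre]
  rw [isIpekoScanB_eq]
  · rw [decide_eq_decide]
    constructor
    · rintro ⟨b, hb, h2, hne, hc⟩
      refine ⟨(b, (ss.count b : Int)), ?_, by simpa using hc, h2, hne⟩
      exact List.mem_map.mpr ⟨b, by simpa [PySem.Set.mem_ofList] using hb, rfl⟩
    · rintro ⟨q, hq, hc, h2, hne⟩
      obtain ⟨k, hk, rfl⟩ := List.mem_map.mp hq
      exact ⟨k, by simpa [PySem.Set.mem_ofList] using hk, h2, hne, by simpa using hc⟩
  · rintro q hq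
    obtain ⟨k, hk, rfl⟩ := List.mem_map.mp hq
    exact hpre k (by simpa [PySem.Set.mem_ofList] using hk)
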